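-- pv_equiv track=rewrite | github.com/yishunlu-222/AnACor_public | AnACor/utils/RayTracing.py | ada_sampling
-- ===== SOURCE A (Python) =====
-- def ada_sampling ( crystal_coordinate , threshold = 10000 ) :
--
--     num = len( crystal_coordinate )
--     sampling = 1
--     result = num
--     while result > threshold :
--         sampling = sampling * 2
--         result = num / sampling
--
--     return sampling
-- ===== SOURCE B (Python) =====
-- def ada_sampling(crystal_coordinate, threshold=10000):
--     num = len(crystal_coordinate)
--     if num <= threshold:
--         return 1
--     # smallest power of two s with num / s <= threshold, i.e. s >= ceil(num/threshold)
--     k = -(-num // threshold)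
--     return 1 << (k - 1).bit_length()
-- ===== Notes on version B (the rewrite author's own statement) =====
-- stated objective: simpler
-- what changed: Replaces the doubling while-loop with a closed-form computation: k = ceil(num/threshold) and the answer is the least power of two >= k via bit_length.
-- outside the precondition, e.g. on ada_sampling([0, 0, 0], -5): A does not finish within the time limit, B returns 2
import Mathlib
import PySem

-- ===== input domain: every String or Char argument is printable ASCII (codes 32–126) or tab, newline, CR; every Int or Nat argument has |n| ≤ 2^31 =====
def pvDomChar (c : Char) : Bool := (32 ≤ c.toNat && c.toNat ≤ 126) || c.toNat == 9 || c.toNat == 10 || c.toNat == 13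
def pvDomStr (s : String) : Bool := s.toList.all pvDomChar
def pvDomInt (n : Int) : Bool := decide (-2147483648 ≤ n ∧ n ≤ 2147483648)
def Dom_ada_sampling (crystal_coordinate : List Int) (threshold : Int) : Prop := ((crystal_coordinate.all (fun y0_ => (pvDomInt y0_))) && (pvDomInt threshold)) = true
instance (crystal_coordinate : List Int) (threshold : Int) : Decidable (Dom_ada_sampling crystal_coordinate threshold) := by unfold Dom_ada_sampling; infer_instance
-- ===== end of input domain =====

-- ===== PORT A =====
-- B is a closed-form (ceil + bit_length) replacement for A's doubling loop; same return value on Pre_.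
-- A's loop compares the float 'num / sampling' with threshold; sampling is a power of two, so the
-- comparison equals the exact integer comparison 'threshold * sampling < num', which the port uses.
-- The loop terminates on Pre_ within at most 'num' doublings, so fuel = num + 1 is ample (proved below).
def adaLoop (fuel : Nat) (num threshold sampling : Int) : Int :=
  match fuel with
  | 0 => sampling
  | f + 1 =>
    if threshold * sampling < num then adaLoop f num threshold (sampling * 2)
    else sampling

def ada_sampling (crystal_coordinate : List Int) (threshold : Int) : Int :=
  adaLoop (crystal_coordinate.length + 1) (crystal_coordinate.length : Int) threshold 1

-- ===== PORT B =====
def ada_sampling_alt (crystal_coordinate : List Int) (threshold : Int) : Int :=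
  let num : Int := (crystal_coordinate.length : Int)
  if num ≤ threshold then 1
  else
    let k : Int := -(PySem.Int.floordiv (-num) threshold)   -- ceil(num / threshold)
    (1 : Int) <<< PySem.Int.bitLength (k - 1)               -- 1 << (k-1).bit_length()

-- ===== PRECONDITION & SPEC =====
-- Pre_ excludes non-positive thresholds with a nonempty list: there A's float comparison governs the
-- exit — with threshold < 0 the loop runs forever, and with threshold = 0 it exits only when
-- num/sampling underflows to float 0.0, returning a huge power of two that is an artefact of float
-- underflow; B's own division naturally raises ZeroDivisionError there. Inside Pre_ B matches A exactly.
def Pre_ada_sampling (crystal_coordinate : List Int) (threshold : Int) : Prop :=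
  0 < threshold ∨ (crystal_coordinate.length : Int) ≤ threshold
instance (crystal_coordinate : List Int) (threshold : Int) : Decidable (Pre_ada_sampling crystal_coordinate threshold) := by unfold Pre_ada_sampling; infer_instance
def pvWitness_ada_sampling : List Int × Int := ([1, 2, 3], 2)

def Spec_ada_sampling (crystal_coordinate : List Int) (threshold : Int) (out : Int) : Prop := out = ada_sampling_alt crystal_coordinate threshold
instance (crystal_coordinate : List Int) (threshold : Int) (out : Int) : Decidable (Spec_ada_sampling crystal_coordinate threshold out) := by unfold Spec_ada_sampling; infer_instance

-- ===== CLAIM (what is proved, stated in full; the proofs are below) =====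
def Claim_equal_ada_sampling : Prop := ∀ (crystal_coordinate : List Int) (threshold : Int), Dom_ada_sampling crystal_coordinate threshold → Pre_ada_sampling crystal_coordinate threshold → Spec_ada_sampling crystal_coordinate threshold (ada_sampling crystal_coordinate threshold)

-- ===== LEMMAS AND PROOFS =====

-- Loop characterization: if m is the least exponent with num ≤ threshold * s * 2^m, the loop
-- multiplies s by 2 exactly m times; any fuel ≥ m suffices.
theorem adaLoop_eq (m : Nat) : ∀ (fuel : Nat) (num threshold s : Int),
    num ≤ threshold * s * 2 ^ m →
    (∀ j : Nat, j < m → threshold * s * 2 ^ j < num) →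
    m ≤ fuel →
    adaLoop fuel num threshold s = s * 2 ^ m := by
  induction m with
  | zero =>
    intro fuel num t s hub _ _
    cases fuel with
    | zero => simp [adaLoop]
    | succ f =>
      simp only [pow_zero, mul_one] at hub
      simp [adaLoop, not_lt.mpr hub]
  | succ m ih =>
    intro fuel num t s hub hmin hfuel
    cases fuel with
    | zero => omega
    | succ f =>
      have h0 : t * s * 2 ^ 0 < num := hmin 0 (Nat.succ_pos m)
      simp only [pow_zero, mul_one] at h0
      simp only [adaLoop, if_pos h0]
      have := ih f num t (s * 2)
        (by rw [show t * (s * 2) * 2 ^ m = t * s * 2 ^ (m + 1) by ring]; exact hub)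
        (by intro j hj
            rw [show t * (s * 2) * 2 ^ j = t * s * 2 ^ (j + 1) by ring]
            exact hmin (j + 1) (by omega))
        (by omega)
      rw [this, pow_succ]; ring

theorem ada_sampling_spec : Claim_equal_ada_sampling := by
  intro cc t _ hpre
  unfold Spec_ada_sampling ada_sampling ada_sampling_alt
  set num : Int := (cc.length : Int) with hnum
  have hnum0 : 0 ≤ num := by positivity
  by_cases hle : num ≤ t
  · -- loop exits immediately; B returns 1
    rw [adaLoop_eq 0 (cc.length + 1) num t 1 (by simpa using hle) (by omega) (by omega)]
    simp [hle]
  · -- num > t, hence 0 < t from Pre_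
    have ht : 0 < t := by
      rcases hpre with h | h
      · exact h
      · exact absurd h hle
    have hlt : t < num := lt_of_not_ge hle
    simp only [if_neg hle]
    set k : Int := -(PySem.Int.floordiv (-num) t) with hk
    have hkspec : (k - 1) * t < num ∧ num ≤ k * t :=
      (PySem.Int.neg_floordiv_neg_eq_iff_of_pos ht).mp hk.symm
    have hk2 : 2 ≤ k := by nlinarith [hkspec.1, hkspec.2]
    set bl : Nat := PySem.Int.bitLength (k - 1) with hbl
    have hkabs : ((k - 1).natAbs : Int) = k - 1 := Int.natAbs_of_nonneg (by omega)
    have hup : k - 1 < (2 : Int) ^ bl := by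
      have := PySem.Int.lt_two_pow_bitLength (k - 1)
      rw [← hkabs]; exact_mod_cast this
    have hlo : (2 : Int) ^ (bl - 1) ≤ k - 1 := by
      have := PySem.Int.two_pow_bitLength_le (k - 1) (by omega)
      rw [← hkabs]; exact_mod_cast this
    have hbl1 : 1 ≤ bl := by
      by_contra h
      have : bl = 0 := by omega
      rw [this] at hup; simp at hup; omega
    -- fuel bound: bl ≤ num, since bl - 1 < 2^(bl-1) ≤ k - 1 and k ≤ num (t ≥ 1)
    have hkn : k ≤ num := by nlinarith [hkspec.1]
    have hbln : (bl : Int) ≤ num := by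
      have h1 : ((bl - 1 : Nat) : Int) < (2 : Int) ^ (bl - 1) := by
        exact_mod_cast Nat.lt_two_pow_self
      have : ((bl - 1 : Nat) : Int) < k - 1 := lt_of_lt_of_le h1 hlo
      have : ((bl - 1 : Nat) : Int) = (bl : Int) - 1 := by push_cast [hbl1]; ring
      omega
    have hfuel : bl ≤ cc.length + 1 := by
      have : (cc.length : Int) = num := hnum.symm
      omega
    rw [adaLoop_eq bl (cc.length + 1) num t 1
      (by have : num ≤ (2 : Int) ^ bl * t := by nlinarith [hkspec.2]
          linarith [this, (by ring : t * 1 * 2 ^ bl = (2:Int) ^ bl * t).ge])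
      (by intro j hj
          have hjle : (2 : Int) ^ j ≤ 2 ^ (bl - 1) :=
            pow_le_pow_right₀ (by norm_num) (by omega)
          have : t * (2 : Int) ^ j ≤ t * (k - 1) := by nlinarith [le_trans hjle hlo]
          nlinarith [hkspec.1])
      hfuel]
    rw [one_mul, Int.shiftLeft_eq, one_mul]
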